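-- pv_equiv track=rewrite | github.com/chochmun/Multi-2D-LiDAR-Based-3D-Motion-Recognition-With-Deep-Learning | QT/test.py | process_array_clusters
-- ===== SOURCE A (Python) =====
-- def process_array_clusters(row):
--     """
--     주어진 행에서 클러스터를 식별하여 리스트로 반환합니다.
--     각 클러스터는 딕셔너리의 목록으로 표현됩니다.
--     """
--     clusters = []
--     current_cluster = []
--     zero_count = 0
--
--     for index, value in enumerate(row):
--         if value != 0:
--             current_cluster.append({'row': None, 'index': index, 'value': value})
--             zero_count = 0
--         else:
--             zero_count += 1
--             if zero_count == 2:
--                 if current_cluster: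
--                     clusters.append(current_cluster)
--                     current_cluster = []
--                 zero_count = 0
--
--     if current_cluster:
--         clusters.append(current_cluster)
--
--     return clusters
-- ===== SOURCE B (Python) =====
-- def _runs(pairs):
--     """Split (index, value) pairs into maximal runs of equal (value != 0) key."""
--     runs = []
--     i = 0
--     n = len(pairs)
--     while i < n:
--         key = pairs[i][1] != 0
--         j = i + 1
--         while j < n and (pairs[j][1] != 0) == key:
--             j += 1
--         runs.append((key, pairs[i:j]))
--         i = j
--     return runs
--
--
-- def process_array_clusters(row):
--     clusters = []
--     current = []
--     for key, run in _runs(list(enumerate(row))):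
--         if key:
--             current.extend({'row': None, 'index': i, 'value': v} for i, v in run)
--         elif len(run) >= 2 and current:
--             clusters.append(current)
--             current = []
--     if current:
--         clusters.append(current)
--     return clusters
-- ===== Notes on version B (the rewrite author's own statement) =====
-- stated objective: alternative
-- what changed: A's single per-element loop carrying a zero_count state machine is replaced by a two-phase run decomposition: the enumerated row is first split into maximal runs of equal (value != 0) key by a recursive span helper, then one decision is made per run (extend the current cluster for a nonzero run, flush it for a zero run of length >= 2).
import Mathlib
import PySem

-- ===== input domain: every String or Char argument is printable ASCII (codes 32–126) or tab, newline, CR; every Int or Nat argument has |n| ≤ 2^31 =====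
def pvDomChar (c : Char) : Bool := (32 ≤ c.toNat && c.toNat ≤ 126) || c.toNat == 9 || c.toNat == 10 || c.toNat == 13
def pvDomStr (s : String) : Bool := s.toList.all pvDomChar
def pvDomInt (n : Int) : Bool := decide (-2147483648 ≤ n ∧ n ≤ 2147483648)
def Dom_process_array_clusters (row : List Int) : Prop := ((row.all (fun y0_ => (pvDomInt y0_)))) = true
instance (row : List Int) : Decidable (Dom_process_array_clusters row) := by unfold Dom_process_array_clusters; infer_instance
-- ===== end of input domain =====

-- B replaces A's per-element zero-counter state machine by a per-run decomposition (split into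
-- maximal nonzero/zero runs first, then one decision per run); objective: alternative structure, same O(n) cost.

-- the dict literal {'row': None, 'index': i, 'value': v} (shared output record format)
def pvDict (i v : Int) : List (String × Option Int) :=
  [("row", none), ("index", some i), ("value", some v)]

-- ===== PORT A =====
-- A's loop body over (clusters, current_cluster, zero_count)
def pvAStep
    (st : List (List (List (String × Option Int))) × List (List (String × Option Int)) × Int)
    (p : Int × Int) :
    List (List (List (String × Option Int))) × List (List (String × Option Int)) × Int :=
  if p.2 ≠ 0 then
    (st.1, st.2.1 ++ [pvDict p.1 p.2], 0)
  else
    if st.2.2 + 1 = 2 then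
      ((if st.2.1 ≠ [] then st.1 ++ [st.2.1] else st.1),
       (if st.2.1 ≠ [] then [] else st.2.1), 0)
    else (st.1, st.2.1, st.2.2 + 1)

def process_array_clusters (row : List Int) : List (List (List (String × Option Int))) :=
  let st := (PySem.List.enumerate row).foldl pvAStep ([], [], 0)
  if st.2.1 ≠ [] then st.1 ++ [st.2.1] else st.1

-- ===== PORT B =====
-- _span: longest prefix of pairs whose (value != 0) equals key, and the rest
def pvSpan (key : Bool) : List (Int × Int) → List (Int × Int) × List (Int × Int)
  | [] => ([], [])
  | p :: t =>
    if decide (p.2 ≠ 0) = key then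
      ((pvSpan key t).1.cons p, (pvSpan key t).2)
    else ([], p :: t)

theorem pvSpan_append (key : Bool) (pairs : List (Int × Int)) :
    (pvSpan key pairs).1 ++ (pvSpan key pairs).2 = pairs := by
  induction pairs with
  | nil => rfl
  | cons p t ih =>
    by_cases h : decide (p.2 ≠ 0) = key
    · simp only [pvSpan, if_pos h, List.cons_append]
      rw [ih]
    · simp only [pvSpan, if_neg h, List.nil_append]

theorem pvSpan_snd_length_le (key : Bool) (pairs : List (Int × Int)) :
    (pvSpan key pairs).2.length ≤ pairs.length := by
  conv_rhs => rw [← pvSpan_append key pairs]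
  simp

-- _runs: maximal runs of equal (value != 0) key
def pvRuns : List (Int × Int) → List (Bool × List (Int × Int))
  | [] => []
  | p :: t =>
    (decide (p.2 ≠ 0), (pvSpan (decide (p.2 ≠ 0)) (p :: t)).1) ::
      pvRuns ((pvSpan (decide (p.2 ≠ 0)) (p :: t)).2)
termination_by pairs => pairs.length
decreasing_by
  simp only [pvSpan]
  simpa using Nat.lt_succ_of_le (pvSpan_snd_length_le (decide (p.2 ≠ 0)) t)

-- B's loop body over runs (clusters, current)
def pvBStep
    (st : List (List (List (String × Option Int))) × List (List (String × Option Int)))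
    (kr : Bool × List (Int × Int)) :
    List (List (List (String × Option Int))) × List (List (String × Option Int)) :=
  if kr.1 then
    (st.1, st.2 ++ kr.2.map (fun p => pvDict p.1 p.2))
  else if 2 ≤ kr.2.length ∧ st.2 ≠ [] then (st.1 ++ [st.2], [])
  else (st.1, st.2)

def process_array_clusters_alt (row : List Int) : List (List (List (String × Option Int))) :=
  let st := (pvRuns (PySem.List.enumerate row)).foldl pvBStep ([], [])
  if st.2 ≠ [] then st.1 ++ [st.2] else st.1

-- ===== PRECONDITION & SPEC =====
def Spec_process_array_clusters (row : List Int) (out : List (List (List (String × Option Int)))) : Prop := out = process_array_clusters_alt row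
instance (row : List Int) (out : List (List (List (String × Option Int)))) : Decidable (Spec_process_array_clusters row out) := by unfold Spec_process_array_clusters; infer_instance

-- ===== CLAIM (what is proved, stated in full; the proofs are below) =====
def Claim_equal_process_array_clusters : Prop := ∀ (row : List Int), Dom_process_array_clusters row → Spec_process_array_clusters row (process_array_clusters row)

-- ===== LEMMAS AND PROOFS =====

-- every pair in the run part of a span satisfies the key
theorem pvSpan_fst_all (key : Bool) (pairs : List (Int × Int)) :
    ∀ q ∈ (pvSpan key pairs).1, decide (q.2 ≠ 0) = key := by
  induction pairs with
  | nil => intro q hq; exact absurd hq (by simp [pvSpan])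
  | cons p t ih =>
    by_cases h : decide (p.2 ≠ 0) = key
    · simp only [pvSpan, if_pos h]
      intro q hq
      rcases List.mem_cons.mp hq with rfl | hq'
      · exact h
      · exact ih q hq'
    · simp only [pvSpan, if_neg h]
      intro q hq
      exact absurd hq (by simp)

-- the head of the rest of a span fails the key
theorem pvSpan_snd_head (key : Bool) (pairs : List (Int × Int)) (q : Int × Int)
    (t' : List (Int × Int)) (h : (pvSpan key pairs).2 = q :: t') :
    decide (q.2 ≠ 0) ≠ key := by
  induction pairs with
  | nil => exact absurd h (by simp [pvSpan])
  | cons p t ih =>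
    by_cases hp : decide (p.2 ≠ 0) = key
    · exact ih (by simpa only [pvSpan, if_pos hp] using h)
    · simp only [pvSpan, if_neg hp] at h
      injection h with h1 _
      exact h1 ▸ hp

-- the finishing step of each port
def pvFinishA (st : List (List (List (String × Option Int))) × List (List (String × Option Int)) × Int) :
    List (List (List (String × Option Int))) :=
  if st.2.1 ≠ [] then st.1 ++ [st.2.1] else st.1

def pvFinishB (st : List (List (List (String × Option Int))) × List (List (String × Option Int))) :
    List (List (List (String × Option Int))) :=
  if st.2 ≠ [] then st.1 ++ [st.2] else st.1

-- A's fold over a run of nonzero values just appends the dicts and resets the counter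
theorem pvFoldA_nonzero (run : List (Int × Int)) (hne : run ≠ [])
    (hall : ∀ q ∈ run, q.2 ≠ 0) (c : List (List (List (String × Option Int))))
    (cur : List (List (String × Option Int))) (zc : Int) :
    run.foldl pvAStep (c, cur, zc) = (c, cur ++ run.map (fun p => pvDict p.1 p.2), 0) := by
  induction run generalizing cur zc with
  | nil => exact absurd rfl hne
  | cons q rs ih =>
    have hq : q.2 ≠ 0 := hall q (by simp)
    simp only [List.foldl_cons, pvAStep, if_pos hq]
    cases rs with
    | nil => simp
    | cons r rs' =>
      rw [ih (by simp) (fun x hx => hall x (by simp [hx]))]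
      simp

-- A's fold over a run of zeros entered with zero_count = 0
theorem pvFoldA_zero (run : List (Int × Int)) (hall : ∀ q ∈ run, q.2 = 0)
    (c : List (List (List (String × Option Int))))
    (cur : List (List (String × Option Int))) :
    run.foldl pvAStep (c, cur, 0) =
      ((if 2 ≤ run.length ∧ cur ≠ [] then c ++ [cur] else c),
       (if 2 ≤ run.length then [] else cur),
       ((run.length % 2 : Nat) : Int)) := by
  induction run using List.reverseRecOn with
  | nil => simp
  | append_singleton rs q ih =>
    have hq : ¬ (q.2 ≠ 0) := by simpa using hall q (by simp)
    rw [List.foldl_append, ih (fun x hx => hall x (by simp [hx]))]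
    simp only [List.foldl_cons, List.foldl_nil, pvAStep, if_neg hq, List.length_append,
      List.length_singleton]
    obtain h0 | h1 | hge : rs.length = 0 ∨ rs.length = 1 ∨ 2 ≤ rs.length := by omega
    · simp [h0]
    · by_cases hcur : cur = [] <;> simp [h1, hcur]
    · have hge1 : 2 ≤ rs.length + 1 := by omega
      rcases Nat.even_or_odd rs.length with he | ho
      · have m2 : rs.length % 2 = 0 := Nat.even_iff.mp he
        have m2' : (rs.length + 1) % 2 = 1 := by omega
        simp [hge, hge1, m2, m2']
      · have m2 : rs.length % 2 = 1 := Nat.odd_iff.mp ho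
        have m2' : (rs.length + 1) % 2 = 0 := by omega
        simp [hge, hge1, m2, m2']

-- main invariant: A's fold-then-finish equals B's runs-fold-then-finish,
-- provided zero_count is 0 whenever the next element is a zero
theorem pvMain : ∀ (n : Nat) (pairs : List (Int × Int))
    (c : List (List (List (String × Option Int))))
    (cur : List (List (String × Option Int))) (zc : Int),
    pairs.length ≤ n →
    (∀ p t, pairs = p :: t → p.2 = 0 → zc = 0) →
    pvFinishA (pairs.foldl pvAStep (c, cur, zc)) =
      pvFinishB ((pvRuns pairs).foldl pvBStep (c, cur)) := by
  intro n
  induction n with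
  | zero =>
    intro pairs c cur zc hlen _
    have hnil : pairs = [] := List.eq_nil_of_length_eq_zero (Nat.le_zero.mp hlen)
    subst hnil
    by_cases hcur : cur = [] <;> simp [pvFinishA, pvFinishB, pvRuns, hcur]
  | succ n ih =>
    intro pairs c cur zc hlen hinv
    cases pairs with
    | nil => by_cases hcur : cur = [] <;> simp [pvFinishA, pvFinishB, pvRuns, hcur]
    | cons p t =>
      have hruns : pvRuns (p :: t) =
          (decide (p.2 ≠ 0), (pvSpan (decide (p.2 ≠ 0)) (p :: t)).1) ::
            pvRuns ((pvSpan (decide (p.2 ≠ 0)) (p :: t)).2) := by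
        rw [pvRuns]
      have hspan1 : (pvSpan (decide (p.2 ≠ 0)) (p :: t)).1 =
          p :: (pvSpan (decide (p.2 ≠ 0)) t).1 := by
        simp [pvSpan]
      have hspan2 : (pvSpan (decide (p.2 ≠ 0)) (p :: t)).2 =
          (pvSpan (decide (p.2 ≠ 0)) t).2 := by
        simp [pvSpan]
      set key := decide (p.2 ≠ 0) with hkey
      set run : List (Int × Int) := p :: (pvSpan key t).1 with hrun
      set rest : List (Int × Int) := (pvSpan key t).2 with hrest
      rw [hspan1, hspan2] at hruns
      have hdecomp : p :: t = run ++ rest := by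
        simp only [hrun, hrest, List.cons_append]
        congr 1
        exact (pvSpan_append key t).symm
      have hrunall : ∀ q ∈ run, decide (q.2 ≠ 0) = key := by
        intro q hq
        rcases List.mem_cons.mp hq with rfl | hq'
        · exact hkey.symm
        · exact pvSpan_fst_all key t q hq'
      have hrestlen : rest.length ≤ n := by
        have h1 : rest.length ≤ t.length := pvSpan_snd_length_le key t
        have h2 : t.length + 1 ≤ n + 1 := by simpa using hlen
        omega
      have hresthead : ∀ q t', rest = q :: t' → decide (q.2 ≠ 0) ≠ key := by
        intro q t' hq
        exact pvSpan_snd_head key t q t' (hrest ▸ hq)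
      clear_value run rest
      conv_lhs => rw [hdecomp, List.foldl_append]
      rw [hruns, List.foldl_cons]
      by_cases hkv : key = true
      · -- nonzero run
        have hallnz : ∀ q ∈ run, q.2 ≠ 0 := by
          intro q hq
          have hk := hrunall q hq
          rw [hkv] at hk
          simpa using hk
        rw [pvFoldA_nonzero run (by simp [hrun]) hallnz]
        have hB : pvBStep (c, cur) (key, run) =
            (c, cur ++ run.map (fun p => pvDict p.1 p.2)) := by
          simp [pvBStep, hkv]
        rw [hB]
        exact ih rest c (cur ++ run.map (fun p => pvDict p.1 p.2)) 0 hrestlen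
          (fun _ _ _ _ => rfl)
      · -- zero run
        have hkf : key = false := by simpa using hkv
        have hallz : ∀ q ∈ run, q.2 = 0 := by
          intro q hq
          have hk := hrunall q hq
          rw [hkf] at hk
          simpa using hk
        have hzc : zc = 0 := hinv p t rfl (by
          have hk := hkey.symm
          rw [hkf] at hk
          simpa using hk)
        rw [hzc, pvFoldA_zero run hallz]
        have hB : pvBStep (c, cur) (key, run) =
            (if 2 ≤ run.length ∧ cur ≠ [] then (c ++ [cur], ([] : List (List (String × Option Int)))) else (c, cur)) := by
          simp only [pvBStep, hkf]
          rfl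
        rw [hB]
        have hinv' : ∀ q t', rest = q :: t' → q.2 = 0 → ((run.length % 2 : Nat) : Int) = 0 := by
          intro q t' hq hq0
          exfalso
          have hk := hresthead q t' hq
          rw [hkf] at hk
          simp at hk
          exact hk hq0
        by_cases hc : 2 ≤ run.length ∧ cur ≠ []
        · rw [if_pos hc]
          have := ih rest (c ++ [cur]) [] ((run.length % 2 : Nat) : Int) hrestlen hinv'
          simpa [hc.1, hc.2] using this
        · rw [if_neg hc]
          by_cases h2 : 2 ≤ run.length
          · have hcur : cur = [] := by
              by_contra hne
              exact hc ⟨h2, hne⟩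
            have := ih rest c [] ((run.length % 2 : Nat) : Int) hrestlen hinv'
            simpa [h2, hcur] using this
          · have := ih rest c cur ((run.length % 2 : Nat) : Int) hrestlen hinv'
            simpa [h2] using this

-- ===== VERDICT (by name: the statement is the Claim_ definition above) =====
theorem process_array_clusters_spec : Claim_equal_process_array_clusters := by
  intro row _
  unfold Spec_process_array_clusters process_array_clusters process_array_clusters_alt
  exact pvMain (PySem.List.enumerate row).length (PySem.List.enumerate row) [] [] 0
    le_rfl (fun _ _ _ _ => rfl)
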